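-- pv_equiv track=rewrite | github.com/qwejiung/undergraduate-research-deep-learning | predcancer/utils.py | get_result_cols
-- ===== SOURCE A (Python) =====
-- def get_result_cols(col_names):
--     split_names = ["val", "test"]
--     split_metric_names = []
--     for s in split_names:
--         for m in [
--             "auroc",
--             "ap",
--             "sensitivity",
--             "specificity",
--             "f1",
--             "accuracy",
--             "brier",
--         ]:
--             split_metric_names.append(f"{s}_{m}")
--     final_metric_names = split_metric_names + [
--         "best_epoch",
--         "best_step",
--         "selected_type",
--         "thres",
--         "ft_elapsed_sec",
--     ]
--     out = []
--     # Append columns that contain any of the final metric names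
--     for col_name in col_names:
--         if any(metric_name in col_name for metric_name in final_metric_names):
--             out.append(col_name)
--     return out
-- ===== SOURCE B (Python) =====
-- def get_result_cols(col_names):
--     metric_names = (
--         "val_auroc", "val_ap", "val_sensitivity", "val_specificity",
--         "val_f1", "val_accuracy", "val_brier",
--         "test_auroc", "test_ap", "test_sensitivity", "test_specificity",
--         "test_f1", "test_accuracy", "test_brier",
--         "best_epoch", "best_step", "selected_type", "thres", "ft_elapsed_sec",
--     )
--     # metric-major: mark the indices of matching columns, then emit them in order
--     hit = set()
--     for name in metric_names:
--         for i, col in enumerate(col_names):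
--             if name in col:
--                 hit.add(i)
--     return [col for i, col in enumerate(col_names) if i in hit]
-- ===== Notes on version B (the rewrite author's own statement) =====
-- stated objective: alternative
-- what changed: Inverts the loop nesting: instead of testing each column against every metric name, B scans the columns once per metric name, collects the indices of matching columns into a set, and then emits the columns whose index was marked, with the 19 metric names written out as a precomputed literal instead of being rebuilt by nested loops.
import Mathlib
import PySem

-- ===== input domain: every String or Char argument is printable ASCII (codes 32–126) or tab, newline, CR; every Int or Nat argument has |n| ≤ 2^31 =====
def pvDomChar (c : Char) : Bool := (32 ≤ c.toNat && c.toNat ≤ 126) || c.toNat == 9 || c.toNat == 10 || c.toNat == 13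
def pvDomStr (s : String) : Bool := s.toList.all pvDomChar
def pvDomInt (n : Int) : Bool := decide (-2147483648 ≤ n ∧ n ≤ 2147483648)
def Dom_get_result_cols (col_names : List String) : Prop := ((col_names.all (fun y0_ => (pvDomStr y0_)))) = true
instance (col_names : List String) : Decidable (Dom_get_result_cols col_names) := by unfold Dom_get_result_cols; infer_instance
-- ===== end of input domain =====

-- B replaces A's column-major filter (each column tested against every metric name) by a
-- metric-major scan that marks matching column indices in a set and then emits the marked
-- columns in order, with the metric-name list precomputed as a literal (objective: alternative).

-- ===== PORT A =====
def get_result_cols (col_names : List String) : List String :=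
  let split_names : List String := ["val", "test"]
  let split_metric_names : List String :=
    split_names.foldl (fun acc s =>
      (["auroc", "ap", "sensitivity", "specificity", "f1", "accuracy", "brier"] : List String).foldl
        (fun acc m => acc ++ [PySem.Str.join "" [s, "_", m]]) acc) []
  let final_metric_names : List String :=
    split_metric_names ++ ["best_epoch", "best_step", "selected_type", "thres", "ft_elapsed_sec"]
  col_names.foldl (fun out col_name =>
    if final_metric_names.any (fun metric_name => PySem.Str.isIn metric_name col_name)
    then out ++ [col_name] else out) []

-- ===== PORT B =====
def pvMetricNames : List String :=
  ["val_auroc", "val_ap", "val_sensitivity", "val_specificity",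
   "val_f1", "val_accuracy", "val_brier",
   "test_auroc", "test_ap", "test_sensitivity", "test_specificity",
   "test_f1", "test_accuracy", "test_brier",
   "best_epoch", "best_step", "selected_type", "thres", "ft_elapsed_sec"]

def get_result_cols_alt (col_names : List String) : List String :=
  let hit : PySem.Set Int :=
    pvMetricNames.foldl (fun hit name =>
      (PySem.List.enumerate col_names 0).foldl (fun hit p =>
        if PySem.Str.isIn name p.2 then PySem.Set.add hit p.1 else hit) hit) PySem.Set.empty
  (PySem.List.enumerate col_names 0).foldl (fun out p =>
    if PySem.Set.contains hit p.1 then out ++ [p.2] else out) []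

-- ===== PRECONDITION & SPEC =====
def Spec_get_result_cols (col_names : List String) (out : List String) : Prop := out = get_result_cols_alt col_names
instance (col_names : List String) (out : List String) : Decidable (Spec_get_result_cols col_names out) := by unfold Spec_get_result_cols; infer_instance

-- ===== CLAIM (what is proved, stated in full; the proofs are below) =====
def Claim_equal_get_result_cols : Prop := ∀ (col_names : List String), Dom_get_result_cols col_names → Spec_get_result_cols col_names (get_result_cols col_names)

-- ===== LEMMAS AND PROOFS =====

-- membership in the set built by the inner loop (one metric name over the enumerated columns)
theorem pv_mem_inner (name : String) (l : List (Int × String)) (h : PySem.Set Int) (j : Int) :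
    (j ∈ l.foldl (fun hit p => if PySem.Str.isIn name p.2 then PySem.Set.add hit p.1 else hit) h) ↔
      j ∈ h ∨ ∃ p ∈ l, PySem.Str.isIn name p.2 = true ∧ p.1 = j := by
  induction l generalizing h with
  | nil => simp
  | cons x t ih =>
    simp only [List.foldl_cons]
    by_cases hx : PySem.Str.isIn name x.2 = true
    · rw [if_pos hx, ih]
      constructor
      · rintro (hm | ⟨q, hq, hqin, hq1⟩)
        · rcases (PySem.Set.mem_add h x.1 j).mp hm with hm | rfl
          · exact Or.inl hm
          · exact Or.inr ⟨x, List.mem_cons_self, hx, rfl⟩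
        · exact Or.inr ⟨q, List.mem_cons_of_mem x hq, hqin, hq1⟩
      · rintro (hm | ⟨q, hq, hqin, hq1⟩)
        · exact Or.inl ((PySem.Set.mem_add h x.1 j).mpr (Or.inl hm))
        · rcases List.mem_cons.mp hq with rfl | hq
          · exact Or.inl ((PySem.Set.mem_add h q.1 j).mpr (Or.inr hq1.symm))
          · exact Or.inr ⟨q, hq, hqin, hq1⟩
    · rw [if_neg hx, ih]
      constructor
      · rintro (hm | ⟨q, hq, hqin, hq1⟩)
        · exact Or.inl hm
        · exact Or.inr ⟨q, List.mem_cons_of_mem x hq, hqin, hq1⟩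
      · rintro (hm | ⟨q, hq, hqin, hq1⟩)
        · exact Or.inl hm
        · rcases List.mem_cons.mp hq with rfl | hq
          · exact absurd hqin hx
          · exact Or.inr ⟨q, hq, hqin, hq1⟩

-- membership in the set built by the whole metric-major loop
theorem pv_mem_hit (names : List String) (l : List (Int × String)) (h : PySem.Set Int) (j : Int) :
    (j ∈ names.foldl (fun hit name =>
        l.foldl (fun hit p => if PySem.Str.isIn name p.2 then PySem.Set.add hit p.1 else hit) hit) h) ↔
      j ∈ h ∨ ∃ name ∈ names, ∃ p ∈ l, PySem.Str.isIn name p.2 = true ∧ p.1 = j := by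
  induction names generalizing h with
  | nil => simp
  | cons n t ih =>
    simp only [List.foldl_cons, ih, pv_mem_inner]
    constructor
    · rintro (⟨hj | hj⟩ | ⟨nm, hnm, hp⟩)
      · exact Or.inl hj
      · exact Or.inr ⟨n, by simp, hj⟩
      · exact Or.inr ⟨nm, by simp [hnm], hp⟩
    · rintro (hj | ⟨nm, hnm, hp⟩)
      · exact Or.inl (Or.inl hj)
      · rcases List.mem_cons.mp hnm with rfl | hnm
        · exact Or.inl (Or.inr hp)
        · exact Or.inr ⟨nm, hnm, hp⟩

-- each member of 'enumerate cs s' is (s+k, cs[k]) for some k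
theorem pv_mem_enumerate (cs : List String) (s : Int) (p : Int × String) :
    p ∈ PySem.List.enumerate cs s ↔ ∃ k : Nat, ∃ hk : k < cs.length, p = (s + k, cs[k]) := by
  induction cs generalizing s with
  | nil => simp [PySem.List.enumerate]
  | cons c t ih =>
    simp only [PySem.List.enumerate, List.mem_cons, ih]
    constructor
    · rintro (rfl | ⟨k, hk, rfl⟩)
      · exact ⟨0, by simp, by simp⟩
      · exact ⟨k + 1, by simpa using hk, by push_cast; simp; ring⟩
    · rintro ⟨k, hk, rfl⟩
      cases k with
      | zero => left; simp
      | succ k =>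
        right
        exact ⟨k, by simpa using hk, by push_cast; simp; ring⟩

-- a filter of 'enumerate' by a predicate on the element, projected back, is a plain filter
theorem pv_filter_enumerate (q : String → Bool) (cs : List String) (s : Int) :
    ((PySem.List.enumerate cs s).filter (fun p => q p.2)).map (·.2) = cs.filter q := by
  induction cs generalizing s with
  | nil => simp [PySem.List.enumerate]
  | cons c t ih =>
    by_cases hc : q c = true <;> simp [PySem.List.enumerate, hc, ih]

-- the indices in 'enumerate cs 0' are injective over their pairs: contains hit = the A-side test
theorem pv_contains_hit (cs : List String) (p : Int × String)
    (hp : p ∈ PySem.List.enumerate cs 0) :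
    PySem.Set.contains
      (pvMetricNames.foldl (fun hit name =>
        (PySem.List.enumerate cs 0).foldl (fun hit q =>
          if PySem.Str.isIn name q.2 then PySem.Set.add hit q.1 else hit) hit) PySem.Set.empty) p.1
      = pvMetricNames.any (fun name => PySem.Str.isIn name p.2) := by
  rcases (pv_mem_enumerate cs 0 p).mp hp with ⟨k, hk, rfl⟩
  rw [Bool.eq_iff_iff, PySem.Set.contains_iff, pv_mem_hit]
  simp only [PySem.Set.empty, List.not_mem_nil, false_or, List.any_eq_true]
  constructor
  · rintro ⟨name, hname, q, hq, hin, hq1⟩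
    rcases (pv_mem_enumerate cs 0 q).mp hq with ⟨k', hk', rfl⟩
    have : k' = k := by omega
    subst this
    exact ⟨name, hname, hin⟩
  · rintro ⟨name, hname, hin⟩
    exact ⟨name, hname, (0 + (k : Int), cs[k]), (pv_mem_enumerate cs 0 _).mpr ⟨k, hk, rfl⟩, hin, rfl⟩

theorem pv_names_eq :
    (["val", "test"] : List String).foldl (fun acc s =>
      (["auroc", "ap", "sensitivity", "specificity", "f1", "accuracy", "brier"] : List String).foldl
        (fun acc m => acc ++ [PySem.Str.join "" [s, "_", m]]) acc) []
      ++ ["best_epoch", "best_step", "selected_type", "thres", "ft_elapsed_sec"]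
      = pvMetricNames := by decide

-- ===== VERDICT (by name: the statement is the Claim_ definition above) =====
theorem get_result_cols_spec : Claim_equal_get_result_cols := by
  intro col_names _
  unfold Spec_get_result_cols get_result_cols get_result_cols_alt
  simp only [pv_names_eq]
  rw [PySem.List.foldl_append_if_eq_filter, PySem.List.foldl_append_if _ (fun p : Int × String => p.2)]
  simp only [List.nil_append]
  rw [List.filter_congr (fun p hp => pv_contains_hit col_names p hp)]
  exact (pv_filter_enumerate _ col_names 0).symm
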